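-- pv_equiv track=rewrite | github.com/lianadelcongo/adventofcode2025 | day1/app.py | compute_rotations2
-- ===== SOURCE A (Python) =====
-- def compute_rotations2(lines: list[str])->int:
--     changes = 0
--     position = 50
--
--     for line in lines:
--         steps = int(line[1:])
--         changes += (steps // 100)
--         if line[0] == "R":
--             new_position = (position + steps)%100
--             if new_position < position:
--                 changes += 1
--         else:
--             new_position = (position - steps)%100
--             if new_position > position:
--                 changes += 1
--         position = new_position
--
--     return changes
-- ===== SOURCE B (Python) =====
-- def compute_rotations2(lines: list[str]) -> int:
--     # Staged passes: parse all moves, build the prefix-sum position trace,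
--     # then sum the signed floor-boundary crossings between consecutive positions.
--     dirs = [1 if line[0] == "R" else -1 for line in lines]
--     deltas = [d * int(line[1:]) for d, line in zip(dirs, lines)]
--     positions = [50]
--     for delta in deltas:
--         positions.append(positions[-1] + delta)
--     floors = [p // 100 for p in positions]
--     return sum(d * (b - a) for d, a, b in zip(dirs, floors, floors[1:]))
-- ===== Notes on version B (the rewrite author's own statement) =====
-- stated objective: alternative
-- what changed: B replaces A's single stateful loop (mod-100 wrapped position with a wrap-comparison branch plus a steps//100 term) by staged passes: parse all moves into signed deltas, build the unbounded prefix-sum position trace, take floor-divisions, and sum signed differences of consecutive floors over a zip.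
import Mathlib
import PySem

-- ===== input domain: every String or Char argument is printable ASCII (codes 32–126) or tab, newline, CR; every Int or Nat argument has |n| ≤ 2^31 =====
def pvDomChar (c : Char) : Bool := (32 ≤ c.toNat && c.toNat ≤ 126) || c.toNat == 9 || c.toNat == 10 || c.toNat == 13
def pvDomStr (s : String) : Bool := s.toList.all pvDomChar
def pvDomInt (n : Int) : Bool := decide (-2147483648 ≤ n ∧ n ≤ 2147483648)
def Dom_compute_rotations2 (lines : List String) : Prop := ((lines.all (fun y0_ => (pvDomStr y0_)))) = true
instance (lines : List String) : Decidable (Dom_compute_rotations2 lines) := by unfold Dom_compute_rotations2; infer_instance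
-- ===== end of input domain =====

-- B replaces A's stateful wrapped-position loop by staged passes (parse, prefix-sum trace,
-- floor map, zipped sum of signed floor differences): alternative decomposition, same cost.

-- ===== PORT A =====
def compute_rotations2_step (st : Int × Int) (line : String) : Int × Int :=
  match PySem.Int.ofChars? (PySem.List.slice line.toList (some 1) none) with
  | none => st  -- int(line[1:]) raises ValueError: excluded by Pre_
  | some steps =>
    let changes := st.1 + PySem.Int.floordiv steps 100
    if PySem.List.pyGet? line.toList 0 = some 'R' then
      let new_position := PySem.Int.mod (st.2 + steps) 100
      ((if new_position < st.2 then changes + 1 else changes), new_position)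
    else
      let new_position := PySem.Int.mod (st.2 - steps) 100
      ((if new_position > st.2 then changes + 1 else changes), new_position)

def compute_rotations2 (lines : List String) : Int :=
  (lines.foldl compute_rotations2_step (0, 50)).1

-- ===== PORT B =====
def compute_rotations2_alt (lines : List String) : Int :=
  let dirs := lines.map (fun line =>
    if PySem.List.pyGet? line.toList 0 = some 'R' then (1 : Int) else -1)
  let deltas := (dirs.zip lines).map (fun dl =>
    match PySem.Int.ofChars? (PySem.List.slice dl.2.toList (some 1) none) with
    | some s => dl.1 * s
    | none => 0)  -- int(line[1:]) raises ValueError: excluded by Pre_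
  let positions := List.scanl (fun p delta => p + delta) 50 deltas
  let floors := positions.map (fun p => PySem.Int.floordiv p 100)
  ((dirs.zip (floors.zip (PySem.List.slice floors (some 1) none))).map
      (fun t => t.1 * (t.2.2 - t.2.1))).sum

-- ===== PRECONDITION & SPEC =====
-- Pre_ excludes exactly the lines on which int(line[1:]) raises ValueError (empty or non-numeric tail).
def Pre_compute_rotations2 (lines : List String) : Prop :=
  ∀ line ∈ lines, (PySem.Int.ofChars? line.toList.tail).isSome = true
instance (lines : List String) : Decidable (Pre_compute_rotations2 lines) := by
  unfold Pre_compute_rotations2; infer_instance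
def pvWitness_compute_rotations2 : List String := ["R150", "L30", "R7", "L250"]

def Spec_compute_rotations2 (lines : List String) (out : Int) : Prop := out = compute_rotations2_alt lines
instance (lines : List String) (out : Int) : Decidable (Spec_compute_rotations2 lines out) := by unfold Spec_compute_rotations2; infer_instance

-- ===== CLAIM (what is proved, stated in full; the proofs are below) =====
def Claim_equal_compute_rotations2 : Prop := ∀ (lines : List String), Dom_compute_rotations2 lines → Pre_compute_rotations2 lines → Spec_compute_rotations2 lines (compute_rotations2 lines)

-- ===== LEMMAS AND PROOFS =====

-- Proof-only recursive form of B's value, with generalized start position.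
def pvBsum (p : Int) (lines : List String) : Int :=
  match lines with
  | [] => 0
  | line :: rest =>
    match PySem.Int.ofChars? (PySem.List.slice line.toList (some 1) none) with
    | none => 0  -- unreachable under Pre_
    | some s =>
      let d : Int := if PySem.List.pyGet? line.toList 0 = some 'R' then 1 else -1
      d * (PySem.Int.floordiv (p + d * s) 100 - PySem.Int.floordiv p 100) + pvBsum (p + d * s) rest

-- B's generalized body (start position p instead of 50), used to relate alt to pvBsum.
def pvAltGen (p : Int) (lines : List String) : Int :=
  let dirs := lines.map (fun line =>
    if PySem.List.pyGet? line.toList 0 = some 'R' then (1 : Int) else -1)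
  let deltas := (dirs.zip lines).map (fun dl =>
    match PySem.Int.ofChars? (PySem.List.slice dl.2.toList (some 1) none) with
    | some s => dl.1 * s
    | none => 0)
  let positions := List.scanl (fun q delta => q + delta) p deltas
  let floors := positions.map (fun q => PySem.Int.floordiv q 100)
  ((dirs.zip (floors.zip (PySem.List.slice floors (some 1) none))).map
      (fun t => t.1 * (t.2.2 - t.2.1))).sum

theorem pvAltGen_eq_Bsum (lines : List String) (p : Int)
    (h : ∀ line ∈ lines, (PySem.Int.ofChars? line.toList.tail).isSome = true) :
    pvAltGen p lines = pvBsum p lines := by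
  induction lines generalizing p with
  | nil => rfl
  | cons line rest ih =>
    have hparse : (PySem.Int.ofChars? (PySem.List.slice line.toList (some 1) none)).isSome = true := by
      rw [PySem.List.slice_from_one]; exact h line List.mem_cons_self
    obtain ⟨s, hs⟩ := Option.isSome_iff_exists.mp hparse
    have hrest := fun q => ih q (fun l hl => h l (List.mem_cons_of_mem _ hl))
    have hs' : PySem.Int.ofChars? line.toList.tail = some s := by
      rw [← PySem.List.slice_from_one]; exact hs
    cases rest with
    | nil =>
      simp [pvAltGen, pvBsum, hs', PySem.List.slice_from_one]
    | cons r rs =>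
      have hr : (PySem.Int.ofChars? (PySem.List.slice r.toList (some 1) none)).isSome = true := by
        rw [PySem.List.slice_from_one]; exact h r (List.mem_cons_of_mem _ List.mem_cons_self)
      obtain ⟨sr, hsr⟩ := Option.isSome_iff_exists.mp hr
      have hsr' : PySem.Int.ofChars? r.toList.tail = some sr := by
        rw [← PySem.List.slice_from_one]; exact hsr
      conv_rhs => rw [pvBsum]
      rw [hs]; dsimp only; rw [← hrest]
      simp only [pvAltGen, hs', hsr', List.map_cons, List.zip_cons_cons,
        List.scanl_cons, PySem.List.slice_from_one, List.tail_cons, List.sum_cons]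

-- One loop step of A, rewritten to B's signed floor-difference form (pure arithmetic).
theorem pv_step_eq (c p s : Int) (line : String)
    (hs : PySem.Int.ofChars? (PySem.List.slice line.toList (some 1) none) = some s) :
    compute_rotations2_step (c, PySem.Int.mod p 100) line =
      (c + (if PySem.List.pyGet? line.toList 0 = some 'R' then (1:Int) else -1) *
            (PySem.Int.floordiv (p + (if PySem.List.pyGet? line.toList 0 = some 'R' then (1:Int) else -1) * s) 100
              - PySem.Int.floordiv p 100),
        PySem.Int.mod (p + (if PySem.List.pyGet? line.toList 0 = some 'R' then (1:Int) else -1) * s) 100) := by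
  unfold compute_rotations2_step
  rw [hs]
  simp only [PySem.Int.floordiv_eq_ediv_of_pos (by omega : (0:Int) < 100),
    PySem.Int.mod_eq_emod_of_pos (by omega : (0:Int) < 100)]
  split_ifs with hR <;> simp only [Prod.mk.injEq] <;> constructor <;> omega

theorem pvBsum_sim (lines : List String) (c p : Int)
    (h : ∀ line ∈ lines, (PySem.Int.ofChars? line.toList.tail).isSome = true) :
    (lines.foldl compute_rotations2_step (c, PySem.Int.mod p 100)).1 = c + pvBsum p lines := by
  induction lines generalizing c p with
  | nil => simp [pvBsum]
  | cons line rest ih =>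
    have hparse : (PySem.Int.ofChars? (PySem.List.slice line.toList (some 1) none)).isSome = true := by
      rw [PySem.List.slice_from_one]; exact h line List.mem_cons_self
    obtain ⟨s, hs⟩ := Option.isSome_iff_exists.mp hparse
    simp only [List.foldl_cons, pv_step_eq c p s line hs]
    rw [ih _ _ (fun l hl => h l (List.mem_cons_of_mem _ hl))]
    simp only [pvBsum, hs]
    ring

-- ===== VERDICT (by name: the statement is the Claim_ definition above) =====
theorem compute_rotations2_spec : Claim_equal_compute_rotations2 := by
  intro lines _ hpre
  unfold Spec_compute_rotations2 compute_rotations2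
  have h1 := pvBsum_sim lines 0 50 hpre
  rw [show PySem.Int.mod (50:Int) 100 = 50 from by decide] at h1
  rw [h1, show compute_rotations2_alt lines = pvAltGen 50 lines from rfl,
    pvAltGen_eq_Bsum lines 50 hpre]
  ring
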